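-- pv_equiv track=rewrite | github.com/mombasawalafaizan/dsa_solution | Greedy/min_cost_cut_the_board.py | minimumCostforCutting
-- ===== SOURCE A (Python) =====
-- def minimumCostforCutting(V, H, m, n):
--     res = 0
--     V.sort(reverse = True)
--     H.sort(reverse = True)
--     hzntl, vrtcl = 1, 1
--     i, j = 0, 0
--
--     while i < m and j < n:
--         if V[i] > H[j]:
--             res += (V[i]*vrtcl)
--             hzntl += 1
--             i += 1
--         else:
--             res += (H[j]*hzntl)
--             vrtcl += 1
--             j += 1
--
--     remaining = 0
--     while i < m:
--         remaining += V[i]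
--         i += 1
--     res += (remaining * vrtcl)
--
--     remaining = 0
--     while j < n:
--         remaining += H[j]
--         j += 1
--     res += (remaining * hzntl)
--
--     return res
-- ===== SOURCE B (Python) =====
-- def minimumCostforCutting(V, H, m, n):
--     # Same in-place descending sorts as A (preserves the argument mutation).
--     V.sort(reverse=True)
--     H.sort(reverse=True)
--     Vm = [V[i] for i in range(m)]
--     Hn = [H[j] for j in range(n)]
--     # Closed form of the greedy total: each cut contributes its own cost once,
--     # and each (vertical, horizontal) pair contributes the smaller of the two.
--     return sum(Vm) + sum(Hn) + sum(min(v, h) for v in Vm for h in Hn)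
-- ===== Notes on version B (the rewrite author's own statement) =====
-- stated objective: alternative
-- what changed: Replaces A's two-pointer greedy merge with tail loops and running multipliers by a closed-form pairwise formula: total = sum of used cuts plus sum over all vertical/horizontal pairs of min(v,h).
import Mathlib
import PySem

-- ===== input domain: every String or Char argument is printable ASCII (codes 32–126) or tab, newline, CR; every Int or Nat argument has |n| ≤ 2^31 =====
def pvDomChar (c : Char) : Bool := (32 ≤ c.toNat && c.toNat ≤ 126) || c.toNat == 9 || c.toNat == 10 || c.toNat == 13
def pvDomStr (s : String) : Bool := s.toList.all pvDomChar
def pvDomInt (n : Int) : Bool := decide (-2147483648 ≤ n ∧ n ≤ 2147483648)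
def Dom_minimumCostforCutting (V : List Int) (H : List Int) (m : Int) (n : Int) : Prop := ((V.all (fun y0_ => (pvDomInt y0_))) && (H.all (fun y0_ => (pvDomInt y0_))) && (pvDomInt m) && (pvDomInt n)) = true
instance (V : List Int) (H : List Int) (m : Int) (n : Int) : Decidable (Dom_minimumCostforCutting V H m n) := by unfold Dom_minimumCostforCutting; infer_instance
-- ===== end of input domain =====

-- B replaces A's two-pointer greedy merge by the closed-form pairwise-min formula (alternative
-- decomposition, not faster). Both Pythons sort V and H in place; equivalence here is about the
-- return value (the mutation is identical in A and B).

-- ===== PORT A =====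
-- the two tail while-loops of A (remaining = 0; while i < m: remaining += V[i])
def aTail (Xs : List Int) (b : Int) (i : Int) (acc : Int) : Int :=
  if _h : i < b then aTail Xs b (i + 1) (acc + PySem.List.pyGetD Xs i 0) else acc
  termination_by (b - i).toNat
  decreasing_by omega

-- A's merge while-loop, followed (in the else branch) by the two tail loops, step for step
def aRun (Vs Hs : List Int) (m n i j hz vr res : Int) : Int :=
  if _h : i < m ∧ j < n then
    if PySem.List.pyGetD Vs i 0 > PySem.List.pyGetD Hs j 0 then
      aRun Vs Hs m n (i + 1) j (hz + 1) vr (res + PySem.List.pyGetD Vs i 0 * vr)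
    else
      aRun Vs Hs m n i (j + 1) hz (vr + 1) (res + PySem.List.pyGetD Hs j 0 * hz)
  else
    (res + aTail Vs m i 0 * vr) + aTail Hs n j 0 * hz
  termination_by ((m - i) + (n - j)).toNat
  decreasing_by all_goals omega

def minimumCostforCutting (V : List Int) (H : List Int) (m : Int) (n : Int) : Int :=
  let Vs := PySem.List.sorted V (fun x => x) true
  let Hs := PySem.List.sorted H (fun x => x) true
  aRun Vs Hs m n 0 0 1 1 0

-- ===== PORT B =====
def minimumCostforCutting_alt (V : List Int) (H : List Int) (m : Int) (n : Int) : Int :=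
  let Vs := PySem.List.sorted V (fun x => x) true
  let Hs := PySem.List.sorted H (fun x => x) true
  let Vm := (PySem.List.pyRange 0 m 1).map (fun i => PySem.List.pyGetD Vs i 0)
  let Hn := (PySem.List.pyRange 0 n 1).map (fun j => PySem.List.pyGetD Hs j 0)
  Vm.sum + Hn.sum + (Vm.map (fun v => (Hn.map (fun h => min v h)).sum)).sum

-- ===== PRECONDITION & SPEC =====
-- A indexes V[i] for i < m and H[j] for j < n, so it raises IndexError unless m ≤ len(V) and n ≤ len(H).
def Pre_minimumCostforCutting (V : List Int) (H : List Int) (m : Int) (n : Int) : Prop :=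
  m ≤ (V.length : Int) ∧ n ≤ (H.length : Int)
instance (V : List Int) (H : List Int) (m : Int) (n : Int) : Decidable (Pre_minimumCostforCutting V H m n) := by unfold Pre_minimumCostforCutting; infer_instance
def pvWitness_minimumCostforCutting : List Int × List Int × Int × Int := ([3, 1, 2], [4, 2], 3, 2)

def Spec_minimumCostforCutting (V : List Int) (H : List Int) (m : Int) (n : Int) (out : Int) : Prop := out = minimumCostforCutting_alt V H m n
instance (V : List Int) (H : List Int) (m : Int) (n : Int) (out : Int) : Decidable (Spec_minimumCostforCutting V H m n out) := by unfold Spec_minimumCostforCutting; infer_instance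

-- ===== CLAIM (what is proved, stated in full; the proofs are below) =====
def Claim_equal_minimumCostforCutting : Prop := ∀ (V : List Int) (H : List Int) (m : Int) (n : Int), Dom_minimumCostforCutting V H m n → Pre_minimumCostforCutting V H m n → Spec_minimumCostforCutting V H m n (minimumCostforCutting V H m n)

-- ===== LEMMAS AND PROOFS =====

-- sum over all (v,h) pairs of min v h (B's inner double sum)
def pairMinSum (vs hs : List Int) : Int := (vs.map (fun v => (hs.map (fun h => min v h)).sum)).sum

theorem pairMinSum_nil_left (hs : List Int) : pairMinSum [] hs = 0 := rfl

theorem pairMinSum_nil_right (vs : List Int) : pairMinSum vs [] = 0 := by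
  simp [pairMinSum]

theorem pairMinSum_cons_left (v : Int) (vs hs : List Int) :
    pairMinSum (v :: vs) hs = (hs.map (fun h => min v h)).sum + pairMinSum vs hs := by
  simp [pairMinSum]

theorem pairMinSum_cons_right (h : Int) (vs hs : List Int) :
    pairMinSum vs (h :: hs) = (vs.map (fun v => min v h)).sum + pairMinSum vs hs := by
  induction vs with
  | nil => simp [pairMinSum]
  | cons v vs ih =>
      simp only [pairMinSum, List.map_cons, List.sum_cons] at *
      omega

theorem map_min_eq_self_right (v : Int) (hs : List Int) (hle : ∀ h ∈ hs, h ≤ v) :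
    (hs.map (fun h => min v h)).sum = hs.sum := by
  induction hs with
  | nil => rfl
  | cons h hs ih =>
      simp only [List.map_cons, List.sum_cons]
      rw [ih (fun x hx => hle x (List.mem_cons_of_mem _ hx)),
        min_eq_right (hle h (List.mem_cons_self))]

theorem map_min_eq_self_left (h : Int) (vs : List Int) (hle : ∀ v ∈ vs, v ≤ h) :
    (vs.map (fun v => min v h)).sum = vs.sum := by
  induction vs with
  | nil => rfl
  | cons v vs ih =>
      simp only [List.map_cons, List.sum_cons]
      rw [ih (fun x hx => hle x (List.mem_cons_of_mem _ hx)),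
        min_eq_left (hle v (List.mem_cons_self))]

theorem aTail_eq_sum (Xs : List Int) (b i acc : Int) (hi : 0 ≤ i) (hb : b ≤ (Xs.length : Int)) :
    aTail Xs b i acc = acc + ((Xs.take b.toNat).drop i.toNat).sum := by
  by_cases h : i < b
  · have hlen : i.toNat < Xs.length := by omega
    have hseg : (Xs.take b.toNat).drop i.toNat = Xs[i.toNat] :: (Xs.take b.toNat).drop (i.toNat + 1) := by
      have h1 : i.toNat < (Xs.take b.toNat).length := by simp; omega
      rw [List.drop_eq_getElem_cons h1, List.getElem_take]
    have ht : (i + 1).toNat = i.toNat + 1 := by omega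
    rw [aTail]
    simp only [h, dif_pos]
    rw [aTail_eq_sum Xs b (i + 1) _ (by omega) hb,
      PySem.List.pyGetD_eq_getElem _ _ hi (by omega), hseg, ht]
    simp only [List.sum_cons]
    ring
  · have hseg : (Xs.take b.toNat).drop i.toNat = [] := by
      apply List.drop_eq_nil_of_le
      simp
      omega
    rw [aTail]
    simp [h, hseg]
  termination_by (b - i).toNat
  decreasing_by omega

theorem aRun_eq_closed (Vs Hs : List Int) (m n i j hz vr res : Int)
    (hi : 0 ≤ i) (hj : 0 ≤ j) (hm : m ≤ (Vs.length : Int)) (hn : n ≤ (Hs.length : Int))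
    (hV : Vs.Pairwise (fun a b => b ≤ a)) (hH : Hs.Pairwise (fun a b => b ≤ a)) :
    aRun Vs Hs m n i j hz vr res =
      res + vr * ((Vs.take m.toNat).drop i.toNat).sum + hz * ((Hs.take n.toNat).drop j.toNat).sum
        + pairMinSum ((Vs.take m.toNat).drop i.toNat) ((Hs.take n.toNat).drop j.toNat) := by
  by_cases h : i < m ∧ j < n
  · obtain ⟨him, hjn⟩ := h
    -- both segments are nonempty, headed by Vs[i.toNat] / Hs[j.toNat]
    have hsegV : (Vs.take m.toNat).drop i.toNat = Vs[i.toNat]'(by omega) :: (Vs.take m.toNat).drop (i.toNat + 1) := by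
      have h1 : i.toNat < (Vs.take m.toNat).length := by simp; omega
      rw [List.drop_eq_getElem_cons h1, List.getElem_take]
    have hsegH : (Hs.take n.toNat).drop j.toNat = Hs[j.toNat]'(by omega) :: (Hs.take n.toNat).drop (j.toNat + 1) := by
      have h1 : j.toNat < (Hs.take n.toNat).length := by simp; omega
      rw [List.drop_eq_getElem_cons h1, List.getElem_take]
    have hpwV : ((Vs.take m.toNat).drop i.toNat).Pairwise (fun a b => b ≤ a) :=
      List.Pairwise.sublist (((Vs.take m.toNat).drop_sublist i.toNat).trans (Vs.take_sublist m.toNat)) hV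
    have hpwH : ((Hs.take n.toNat).drop j.toNat).Pairwise (fun a b => b ≤ a) :=
      List.Pairwise.sublist (((Hs.take n.toNat).drop_sublist j.toNat).trans (Hs.take_sublist n.toNat)) hH
    have hheadV : ∀ x ∈ (Vs.take m.toNat).drop (i.toNat + 1), x ≤ Vs[i.toNat]'(by omega) := by
      rw [hsegV] at hpwV
      exact (List.pairwise_cons.mp hpwV).1
    have hheadH : ∀ x ∈ (Hs.take n.toNat).drop (j.toNat + 1), x ≤ Hs[j.toNat]'(by omega) := by
      rw [hsegH] at hpwH
      exact (List.pairwise_cons.mp hpwH).1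
    have hgV : PySem.List.pyGetD Vs i 0 = Vs[i.toNat]'(by omega) :=
      PySem.List.pyGetD_eq_getElem _ _ hi (by omega)
    have hgH : PySem.List.pyGetD Hs j 0 = Hs[j.toNat]'(by omega) :=
      PySem.List.pyGetD_eq_getElem _ _ hj (by omega)
    have htV : (i + 1).toNat = i.toNat + 1 := by omega
    have htH : (j + 1).toNat = j.toNat + 1 := by omega
    rw [aRun]
    simp only [him, hjn, and_self, dif_pos]
    by_cases hc : PySem.List.pyGetD Vs i 0 > PySem.List.pyGetD Hs j 0
    · rw [if_pos hc,
        aRun_eq_closed Vs Hs m n (i + 1) j (hz + 1) vr _ (by omega) hj hm hn hV hH,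
        htV, hgV, hsegV, hsegH, pairMinSum_cons_left]
      rw [hgV, hgH] at hc
      have hmin : ((Hs[j.toNat]'(by omega) :: (Hs.take n.toNat).drop (j.toNat + 1)).map
          (fun h => min (Vs[i.toNat]'(by omega)) h)).sum
          = (Hs[j.toNat]'(by omega) :: (Hs.take n.toNat).drop (j.toNat + 1)).sum := by
        apply map_min_eq_self_right
        intro x hx
        rcases List.mem_cons.mp hx with rfl | hx'
        · omega
        · have := hheadH x hx'; omega
      rw [hmin]
      simp only [List.sum_cons]
      ring
    · rw [if_neg hc,
        aRun_eq_closed Vs Hs m n i (j + 1) hz (vr + 1) _ hi (by omega) hm hn hV hH,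
        htH, hgH, hsegH, hsegV, pairMinSum_cons_right]
      rw [hgV, hgH] at hc
      have hmin : ((Vs[i.toNat]'(by omega) :: (Vs.take m.toNat).drop (i.toNat + 1)).map
          (fun v => min v (Hs[j.toNat]'(by omega)))).sum
          = (Vs[i.toNat]'(by omega) :: (Vs.take m.toNat).drop (i.toNat + 1)).sum := by
        apply map_min_eq_self_left
        intro x hx
        rcases List.mem_cons.mp hx with rfl | hx'
        · omega
        · have := hheadV x hx'; omega
      rw [hmin]
      simp only [List.sum_cons]
      ring
  · rw [aRun]
    simp only [h, dif_neg, not_false_iff]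
    rw [aTail_eq_sum Vs m i 0 hi hm, aTail_eq_sum Hs n j 0 hj hn]
    have hP : pairMinSum ((Vs.take m.toNat).drop i.toNat) ((Hs.take n.toNat).drop j.toNat) = 0 := by
      rcases not_and_or.mp h with hcase | hcase
      · have : (Vs.take m.toNat).drop i.toNat = [] := by
          apply List.drop_eq_nil_of_le; simp; omega
        rw [this, pairMinSum_nil_left]
      · have : (Hs.take n.toNat).drop j.toNat = [] := by
          apply List.drop_eq_nil_of_le; simp; omega
        rw [this, pairMinSum_nil_right]
    rw [hP]
    ring
  termination_by ((m - i) + (n - j)).toNat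
  decreasing_by all_goals omega

-- B's comprehension [xs[k] for k in range(b)] is xs.take b.toNat when b ≤ len xs
theorem map_range_getD_eq_take (xs : List Int) (b : Int) (hb : b ≤ (xs.length : Int)) :
    (PySem.List.pyRange 0 b 1).map (fun i => PySem.List.pyGetD xs i 0) = xs.take b.toNat := by
  rw [PySem.List.pyRange_one, List.map_map]
  apply List.ext_getElem
  · simp; omega
  · intro k h1 h2
    simp only [List.getElem_map, List.getElem_range, Function.comp_apply, zero_add,
      PySem.List.pyGetD_natCast, List.getElem_take]
    have hk : k < xs.length := by
      simp at h1; omega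
    rw [List.getD_eq_getElem?_getD, List.getElem?_eq_getElem hk]
    rfl

-- ===== VERDICT (by name: the statement is the Claim_ definition above) =====
theorem minimumCostforCutting_spec : Claim_equal_minimumCostforCutting := by
  intro V H m n _hdom hpre
  obtain ⟨hm, hn⟩ := hpre
  unfold Spec_minimumCostforCutting minimumCostforCutting minimumCostforCutting_alt
  dsimp only
  have hlenV : ((PySem.List.sorted V (fun x => x) true).length : Int) = (V.length : Int) := by
    rw [PySem.List.length_sorted]
  have hlenH : ((PySem.List.sorted H (fun x => x) true).length : Int) = (H.length : Int) := by
    rw [PySem.List.length_sorted]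
  rw [aRun_eq_closed _ _ m n 0 0 1 1 0 le_rfl le_rfl (by omega) (by omega)
      (PySem.List.sorted_pairwise_rev V (fun x => x)) (PySem.List.sorted_pairwise_rev H (fun x => x)),
    map_range_getD_eq_take _ m (by omega), map_range_getD_eq_take _ n (by omega)]
  simp only [Int.toNat_zero, List.drop_zero, pairMinSum]
  ring
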